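-- pv_equiv track=rewrite | github.com/JeongHoLim/practice | boj/1439.py | func
-- ===== SOURCE A (Python) =====
-- def func(s):
--     one = 0
--     zero = 0
--
--     for i in range(len(s)):
--         if i > 0 and s[i] == s[i-1] : continue
--         if s[i] == "1":
--             one += 1
--         else :
--             zero += 1
--
--     return min(one,zero)
-- ===== SOURCE B (Python) =====
-- def func(s):
--     if not s:
--         return 0
--     t = 0  # boundaries between adjacent unequal characters
--     u = 0  # boundaries where exactly one side is '1'
--     for a, b in zip(s, s[1:]):
--         t += a != b
--         u += (a == '1') != (b == '1')
--     ones = (u + (s[0] == '1') + (s[-1] == '1')) // 2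
--     return min(ones, t + 1 - ones)
-- ===== Notes on version B (the rewrite author's own statement) =====
-- stated objective: alternative
-- what changed: B never counts run groups: it makes one pass over adjacent character pairs maintaining two boundary counters (t = unequal neighbours, u = neighbours on different sides of the is-'1' test) and recovers min(one-groups, other-groups) arithmetically as min(ones, t+1-ones) with ones = (u + [s[0]=='1'] + [s[-1]=='1'])//2, instead of A's index loop that starts a counter at every group head and compares the two counters with min().
import Mathlib
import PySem

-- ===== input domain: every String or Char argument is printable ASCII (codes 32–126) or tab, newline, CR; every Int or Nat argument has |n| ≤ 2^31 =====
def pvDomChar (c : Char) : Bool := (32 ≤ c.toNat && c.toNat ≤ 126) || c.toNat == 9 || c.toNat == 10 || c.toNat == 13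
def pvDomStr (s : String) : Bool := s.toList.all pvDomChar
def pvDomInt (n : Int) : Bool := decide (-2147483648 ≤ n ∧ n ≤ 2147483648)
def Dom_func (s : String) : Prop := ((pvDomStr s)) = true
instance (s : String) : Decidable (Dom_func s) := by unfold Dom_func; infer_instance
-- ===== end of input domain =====

-- B replaces A's two run counters by counting adjacent-boundary transitions and deriving
-- both run counts arithmetically (objective: alternative).

-- ===== PORT A =====
-- loop body of A: for i in range(len(s)): if i>0 and s[i]==s[i-1]: continue; …
def stepA (cs : List Char) (p : Int × Int) (i : Int) : Int × Int :=
  if i > 0 ∧ PySem.List.pyGetD cs i ' ' = PySem.List.pyGetD cs (i - 1) ' ' then p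
  else if PySem.List.pyGetD cs i ' ' = '1' then (p.1 + 1, p.2)
  else (p.1, p.2 + 1)

def func (s : String) : Int :=
  let cs := s.toList
  let p := (PySem.List.pyRange 0 (cs.length : Int) 1).foldl (stepA cs) (0, 0)
  min p.1 p.2

-- ===== PORT B =====
-- loop body of B: t += a != b; u += (a == '1') != (b == '1')
def stepB (tu : Int × Int) (ab : Char × Char) : Int × Int :=
  ((tu.1 + if ab.1 ≠ ab.2 then 1 else 0),
   (tu.2 + if (ab.1 = '1') ≠ (ab.2 = '1') then 1 else 0))

-- s[0] / s[-1] are only evaluated after the emptiness guard, so pyGetD is exact here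
def func_alt (s : String) : Int :=
  let cs := s.toList
  if cs = [] then 0
  else
    let tu := (cs.zip (PySem.List.slice cs (some 1) none)).foldl stepB (0, 0)
    let ones := PySem.Int.floordiv
      (tu.2 + (if PySem.List.pyGetD cs 0 ' ' = '1' then 1 else 0)
            + (if PySem.List.pyGetD cs (-1) ' ' = '1' then 1 else 0)) 2
    min ones (tu.1 + 1 - ones)

-- ===== PRECONDITION & SPEC =====
def Spec_func (s : String) (out : Int) : Prop := out = func_alt s
instance (s : String) (out : Int) : Decidable (Spec_func s out) := by unfold Spec_func; infer_instance

-- ===== CLAIM (what is proved, stated in full; the proofs are below) =====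
def Claim_equal_func : Prop := ∀ (s : String), Dom_func s → Spec_func s (func s)

-- ===== LEMMAS AND PROOFS =====

-- 0/1 indicator of "c is '1'"
def bOne (c : Char) : Int := if c = '1' then 1 else 0

-- indexing a strict prefix of cs ++ [c] agrees with indexing cs
lemma pyGetD_append_singleton_lt (cs : List Char) (c d : Char) (i : Int)
    (h0 : 0 ≤ i) (h1 : i < (cs.length : Int)) :
    PySem.List.pyGetD (cs ++ [c]) i d = PySem.List.pyGetD cs i d := by
  rw [PySem.List.pyGetD_eq_getElem (cs ++ [c]) d h0 (by simp; omega),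
      PySem.List.pyGetD_eq_getElem cs d h0 h1]
  exact List.getElem_append_left (by omega)

-- the fold of A's step over a prefix range only looks at prefix indices
lemma foldl_stepA_prefix (cs : List Char) (c : Char) (p : Int × Int) :
    (PySem.List.pyRange 0 (cs.length : Int) 1).foldl (stepA (cs ++ [c])) p
      = (PySem.List.pyRange 0 (cs.length : Int) 1).foldl (stepA cs) p := by
  apply PySem.List.foldl_congr_mem
  intro acc i hi
  rw [PySem.List.mem_pyRange_one] at hi
  unfold stepA
  by_cases h : i > 0
  · rw [pyGetD_append_singleton_lt cs c ' ' i (by omega) (by omega),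
        pyGetD_append_singleton_lt cs c ' ' (i - 1) (by omega) (by omega)]
  · simp [h]
    rw [pyGetD_append_singleton_lt cs c ' ' i (by omega) (by omega)]

-- the adjacent-pair list of a snoc extends by the (last, new) boundary
lemma zip_tail_snoc (cs : List Char) (c : Char) (h : cs ≠ []) :
    (cs ++ [c]).zip (cs ++ [c]).tail
      = cs.zip cs.tail ++ [(cs.getLast h, c)] := by
  induction cs with
  | nil => exact absurd rfl h
  | cons x rest ih =>
    cases rest with
    | nil => simp
    | cons y rest' =>
      have := ih (by simp)
      simp only [List.cons_append, List.tail_cons] at this ⊢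
      rw [List.zip_cons_cons, this]
      simp [List.getLast]

-- core invariant tying A's pair to B's two boundary counters
lemma main_invariant (cs : List Char) (h : cs ≠ []) :
    (2 * ((PySem.List.pyRange 0 (cs.length : Int) 1).foldl (stepA cs) (0, 0)).1
        = ((cs.zip cs.tail).foldl stepB (0, 0)).2 + bOne (cs.headD ' ') + bOne (cs.getLast h))
    ∧ ((PySem.List.pyRange 0 (cs.length : Int) 1).foldl (stepA cs) (0, 0)).1
        + ((PySem.List.pyRange 0 (cs.length : Int) 1).foldl (stepA cs) (0, 0)).2
        = ((cs.zip cs.tail).foldl stepB (0, 0)).1 + 1 := by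
  induction cs using List.reverseRecOn with
  | nil => exact absurd rfl h
  | append_singleton cs c ih =>
    rcases eq_or_ne cs [] with hnil | hne
    · subst hnil
      simp only [List.nil_append]
      have h1 : ((1:Nat) : Int) = 0 + 1 := by norm_num
      rw [show ([c].length : Int) = (0:Int) + 1 by simp,
          PySem.List.pyRange_one_succ_right (by norm_num), PySem.List.pyRange_one_eq_nil (by norm_num)]
      unfold stepA bOne
      rcases eq_or_ne c '1' with hc | hc <;> simp [hc, List.getLast]
    · obtain ⟨ihA, ihB⟩ := ih hne
      have hcs : (0:Int) < (cs.length : Int) := by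
        have := List.length_pos_iff.mpr hne; exact_mod_cast this
      have hA : (PySem.List.pyRange 0 ((cs ++ [c]).length : Int) 1).foldl (stepA (cs ++ [c])) (0, 0)
          = stepA (cs ++ [c])
              ((PySem.List.pyRange 0 (cs.length : Int) 1).foldl (stepA cs) (0, 0))
              (cs.length : Int) := by
        have : ((cs ++ [c]).length : Int) = (cs.length : Int) + 1 := by simp
        rw [this, PySem.List.pyRange_one_succ_right (by positivity), List.foldl_append,
            foldl_stepA_prefix]
        rfl
      have hB : ((cs ++ [c]).zip (cs ++ [c]).tail).foldl stepB (0, 0)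
          = stepB ((cs.zip cs.tail).foldl stepB (0, 0)) (cs.getLast hne, c) := by
        rw [zip_tail_snoc cs c hne, List.foldl_append]; rfl
      have hget_c : PySem.List.pyGetD (cs ++ [c]) (cs.length : Int) ' ' = c := by
        rw [PySem.List.pyGetD_eq_getElem (cs ++ [c]) ' ' (by positivity) (by simp)]
        simp
      have hget_prev : PySem.List.pyGetD (cs ++ [c]) ((cs.length : Int) - 1) ' '
          = cs.getLast hne := by
        rw [pyGetD_append_singleton_lt cs c ' ' _ (by omega) (by omega),
            PySem.List.pyGetD_eq_getElem cs ' ' (by omega) (by omega)]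
        rw [List.getLast_eq_getElem]
        congr 1
        omega
      have hhead : (cs ++ [c]).headD ' ' = cs.headD ' ' := by
        cases cs with
        | nil => exact absurd rfl hne
        | cons x r => simp
      have hlast : (cs ++ [c]).getLast (by simp) = c := by simp
      rw [hA, hB, hhead]
      set p := (PySem.List.pyRange 0 (cs.length : Int) 1).foldl (stepA cs) (0, 0) with hp
      set tu := (cs.zip cs.tail).foldl stepB (0, 0) with htu
      set d := cs.getLast hne with hd
      have hstepA : stepA (cs ++ [c]) p (cs.length : Int)
          = if c = d then p else if c = '1' then (p.1 + 1, p.2) else (p.1, p.2 + 1) := by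
        unfold stepA
        rw [hget_c, hget_prev]
        rcases eq_or_ne c d with h1 | h1
        · rw [if_pos ⟨hcs, h1⟩, if_pos h1]
        · rw [if_neg (by rintro ⟨_, h2⟩; exact h1 h2), if_neg h1]
      have hstepB : stepB tu (d, c)
          = (tu.1 + (if d = c then 0 else 1),
             tu.2 + (if (d = '1') = (c = '1') then 0 else 1)) := by
        unfold stepB
        dsimp only
        congr 1
        · by_cases h : d = c
          · rw [if_pos h, if_neg (by simpa using h)]
          · rw [if_neg h, if_pos h]
        · by_cases h : (d = '1') = (c = '1')
          · rw [if_pos h, if_neg (by simpa using h)]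
          · rw [if_neg h, if_pos h]
      rw [hstepA, hstepB, hlast]
      rcases eq_or_ne c d with hcd | hcd
      · -- same character: nothing moves
        have hB2 : (d = '1') = (c = '1') := by rw [hcd]
        rw [if_pos hcd, if_pos (by rw [hcd]), if_pos hB2]
        have : bOne c = bOne d := by unfold bOne; rw [hcd]
        rw [this]
        exact ⟨by simpa using ihA, by simpa using ihB⟩
      · rw [if_neg hcd, if_neg (show ¬ (d = c) from fun h => hcd h.symm)]
        rcases eq_or_ne c '1' with hc1 | hc1
        · have hd1 : d ≠ '1' := fun h' => hcd (hc1.trans h'.symm)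
          have hB2 : ¬ ((d = '1') = (c = '1')) := fun h =>
            hd1 ((iff_of_eq h).mpr hc1)
          rw [if_pos hc1, if_neg hB2]
          unfold bOne at ihA ⊢
          rw [if_neg hd1] at ihA
          rw [if_pos hc1]
          exact ⟨by dsimp only; omega, by dsimp only; omega⟩
        · rw [if_neg hc1]
          rcases eq_or_ne d '1' with hd1 | hd1
          · have hB2 : ¬ ((d = '1') = (c = '1')) := fun h =>
              hc1 ((iff_of_eq h).mp hd1)
            rw [if_neg hB2]
            unfold bOne at ihA ⊢
            rw [if_pos hd1] at ihA
            rw [if_neg hc1]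
            exact ⟨by dsimp only; omega, by dsimp only; omega⟩
          · have hB2 : (d = '1') = (c = '1') := by simp [hd1, hc1]
            rw [if_pos hB2]
            unfold bOne at ihA ⊢
            rw [if_neg hd1] at ihA
            rw [if_neg hc1]
            exact ⟨by dsimp only; omega, by dsimp only; omega⟩

-- ===== VERDICT (by name: the statement is the Claim_ definition above) =====
theorem func_spec : Claim_equal_func := by
  intro s _
  unfold Spec_func func func_alt
  rcases eq_or_ne s.toList [] with hnil | hne
  · simp [hnil, PySem.List.pyRange_one_eq_nil]
  · obtain ⟨h1, h2⟩ := main_invariant s.toList hne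
    simp only [if_neg hne, PySem.List.slice_from_one]
    rw [PySem.List.pyGetD_zero, PySem.List.pyGetD_neg_one s.toList ' ' hne]
    have hhd : s.toList.getD 0 ' ' = s.toList.headD ' ' := by
      cases s.toList with
      | nil => rfl
      | cons x r => rfl
    rw [hhd]
    unfold bOne at h1
    set p := (PySem.List.pyRange 0 (s.toList.length : Int) 1).foldl (stepA s.toList) (0, 0)
    set tu := (s.toList.zip s.toList.tail).foldl stepB (0, 0)
    have hones : PySem.Int.floordiv
        (tu.2 + (if s.toList.headD ' ' = '1' then 1 else 0)
              + (if s.toList.getLast hne = '1' then 1 else 0)) 2 = p.1 := by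
      rw [show tu.2 + (if s.toList.headD ' ' = '1' then (1:Int) else 0)
            + (if s.toList.getLast hne = '1' then (1:Int) else 0) = 2 * p.1 from h1.symm]
      rw [PySem.Int.floordiv_eq_ediv_of_pos (by norm_num)]
      omega
    rw [hones]
    congr 1
    omega
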